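-- pv_equiv track=rewrite | github.com/haiduo/self_leetcode | shixi/python_code/全排列.py | permute3
-- ===== SOURCE A (Python) =====
-- from typing import List
--
-- def permute3(nums: List[int], k: int) -> List[List[int]]:
--     n = len(nums)
--     res = []
--     if len(nums) == 0:
--         return res
--     path = [] #借助系统栈空间，保存所需要的状态变量
--     used = [False]*n #初始化的时候都为false,表示这些数还没有被选择
--     def dfs(n, depth):
--         if depth == k:
--             res.append(path.copy())
--             return
--         for i in range(n):
--             if not used[i]:
--                 used[i] = True
--                 path.append(nums[i])
--                 dfs(n, depth + 1)
--                 used[i] = False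
--                 path.pop()
--     dfs(n, 0)
--     return res
-- ===== SOURCE B (Python) =====
-- from typing import List
--
-- def permute3(nums: List[int], k: int) -> List[List[int]]:
--     if len(nums) == 0:
--         return []
--     def go(remaining, prefix):
--         if len(prefix) == k:
--             return [prefix]
--         out = []
--         for i in range(len(remaining)):
--             out += go(remaining[:i] + remaining[i+1:], prefix + [remaining[i]])
--         return out
--     return go(nums, [])
-- ===== Notes on version B (the rewrite author's own statement) =====
-- stated objective: simpler
-- what changed: Replaces A's used[] boolean array, mutable path and index-based DFS with a plain recursion on a shrinking list of remaining candidates and an immutable prefix.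
import Mathlib
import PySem

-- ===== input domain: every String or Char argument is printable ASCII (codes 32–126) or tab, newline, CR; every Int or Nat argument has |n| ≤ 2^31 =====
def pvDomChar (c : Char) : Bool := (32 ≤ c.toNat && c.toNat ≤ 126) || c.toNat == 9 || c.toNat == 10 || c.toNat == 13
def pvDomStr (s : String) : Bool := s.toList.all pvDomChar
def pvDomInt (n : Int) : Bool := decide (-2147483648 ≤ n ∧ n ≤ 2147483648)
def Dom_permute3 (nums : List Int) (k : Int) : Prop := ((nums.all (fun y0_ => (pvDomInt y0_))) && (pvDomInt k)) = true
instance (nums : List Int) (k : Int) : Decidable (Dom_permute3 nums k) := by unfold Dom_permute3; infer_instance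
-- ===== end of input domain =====

-- B replaces A's used[]/path[] index bookkeeping by a recursion on a shrinking
-- list of remaining candidates (objective: simpler; return values proved equal).

-- ===== PORT A =====
-- termination helper for the port's well-founded recursion (cited by decreasing_by)
theorem pvCountFalseSetLt (used : List Bool) (i : Nat)
    (h : used.getD i true = false) :
    (used.set i true).count false < used.count false := by
  induction used generalizing i with
  | nil => simp [List.getD] at h
  | cons b t ih =>
    cases i with
    | zero =>
      simp [List.getD] at h; subst h
      simp [List.count_cons]
    | succ j =>
      simp [List.getD] at h
      have := ih j (by simpa [List.getD] using h)
      cases b <;> simp [List.count_cons] <;> omega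

mutual
-- dfs(n, depth) of A; the mutated res/path/used become explicit state, res is the return value
def permA_dfs (nums : List Int) (k : Int) (n : Nat) (used : List Bool)
    (path : List Int) (depth : Int) : List (List Int) :=
  if depth = k then [path]
  else permA_loop nums k n used path depth (List.range n)
termination_by (used.count false, n + 1)
decreasing_by
  simp only [List.length_range]
  exact Prod.Lex.right _ (Nat.lt_succ_self n)

-- the 'for i in range(n)' loop inside dfs (i always in range in Python; getD defaults are unreachable)
def permA_loop (nums : List Int) (k : Int) (n : Nat) (used : List Bool)
    (path : List Int) (depth : Int) (is : List Nat) : List (List Int) :=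
  match is with
  | [] => []
  | i :: is' =>
    (if h : used.getD i true = false then
      permA_dfs nums k n (used.set i true) (path ++ [nums.getD i 0]) (depth + 1)
    else []) ++ permA_loop nums k n used path depth is'
termination_by (used.count false, is.length)
decreasing_by
  · exact Prod.Lex.left _ _ (pvCountFalseSetLt used i h)
  · exact Prod.Lex.right _ (Nat.lt_succ_self _)
end

def permute3 (nums : List Int) (k : Int) : List (List Int) :=
  if nums.length = 0 then []
  else permA_dfs nums k nums.length (List.replicate nums.length false) [] 0

-- ===== PORT B =====
mutual
-- go(remaining, prefix) of Source B ('prefix' is a Lean keyword, hence pfx)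
def permB_go (k : Int) (remaining : List Int) (pfx : List Int) : List (List Int) :=
  if (pfx.length : Int) = k then [pfx]
  else permB_loop k remaining pfx 0
termination_by (remaining.length, remaining.length + 1)
decreasing_by
  exact Prod.Lex.right _ (by omega)

-- 'for i in range(len(remaining))' as a counter loop; remaining[:i]+remaining[i+1:] is take i ++ drop (i+1) (exact: i ≥ 0)
def permB_loop (k : Int) (remaining : List Int) (pfx : List Int) (j : Nat) : List (List Int) :=
  if h : j < remaining.length then
    permB_go k (remaining.take j ++ remaining.drop (j + 1)) (pfx ++ [remaining.getD j 0])
      ++ permB_loop k remaining pfx (j + 1)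
  else []
termination_by (remaining.length, remaining.length - j)
decreasing_by
  · exact Prod.Lex.left _ _ (by simp [List.length_take, List.length_drop]; omega)
  · exact Prod.Lex.right _ (by omega)
end

def permute3_alt (nums : List Int) (k : Int) : List (List Int) :=
  if nums.length = 0 then []
  else permB_go k nums []

-- ===== PRECONDITION & SPEC =====
def Spec_permute3 (nums : List Int) (k : Int) (out : List (List Int)) : Prop := out = permute3_alt nums k
instance (nums : List Int) (k : Int) (out : List (List Int)) : Decidable (Spec_permute3 nums k out) := by unfold Spec_permute3; infer_instance

-- ===== CLAIM (what is proved, stated in full; the proofs are below) =====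
def Claim_equal_permute3 : Prop := ∀ (nums : List Int) (k : Int), Dom_permute3 nums k → Spec_permute3 nums k (permute3 nums k)

-- ===== LEMMAS AND PROOFS =====

-- the indices A still regards as available, in increasing order
def pvUnused (used : List Bool) : List Nat :=
  (List.range used.length).filter (fun i => !used.getD i true)

theorem pvUnused_nodup (used : List Bool) : (pvUnused used).Nodup :=
  (List.nodup_range).filter _

theorem pvLoopA_eq (nums : List Int) (k : Int) (n : Nat) (used : List Bool)
    (path : List Int) (depth : Int) (is : List Nat) :
    permA_loop nums k n used path depth is =
      (is.filter (fun i => !used.getD i true)).flatMap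
        (fun i => permA_dfs nums k n (used.set i true) (path ++ [nums.getD i 0]) (depth + 1)) := by
  induction is with
  | nil => rw [permA_loop]; simp
  | cons i is ih =>
    rw [permA_loop, ih, List.filter_cons]
    by_cases h : used.getD i true = false
    · rw [dif_pos h, if_pos (by simp; exact h), List.flatMap_cons]
    · have hb : used.getD i true = true := by
        cases hb2 : used.getD i true
        · exact absurd hb2 h
        · rfl
      rw [dif_neg h, if_neg (by simp; exact hb), List.nil_append]

theorem pvLoopB_eq (k : Int) (remaining pfx : List Int) :
    ∀ (m j : Nat), remaining.length - j = m →
    permB_loop k remaining pfx j =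
      (List.range' j m).flatMap
        (fun j' => permB_go k (remaining.take j' ++ remaining.drop (j' + 1))
          (pfx ++ [remaining.getD j' 0])) := by
  intro m
  induction m with
  | zero =>
    intro j hj
    rw [permB_loop]
    simp [Nat.not_lt.mpr (by omega : remaining.length ≤ j)]
  | succ m ih =>
    intro j hj
    rw [permB_loop]
    have hlt : j < remaining.length := by omega
    simp only [hlt, dif_pos, List.range'_succ, List.flatMap_cons]
    rw [ih (j + 1) (by omega)]

theorem pvFlatMapPos {α β : Type} (d : α) :
    ∀ (l : List α) (F : Nat → List β) (G : α → List β),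
    (∀ j, j < l.length → F j = G (l.getD j d)) →
    (List.range l.length).flatMap F = l.flatMap G := by
  intro l
  induction l with
  | nil => intro F G _; simp
  | cons a t ih =>
    intro F G h
    have h0 : F 0 = G a := by simpa using h 0 (by simp)
    simp only [List.length_cons, List.range_succ_eq_map, List.flatMap_cons,
      List.flatMap_map, h0]
    congr 1
    exact ih (fun j => F (Nat.succ j)) G (fun j hj => by simpa using h (j + 1) (by simpa using hj))

theorem pvFilterNeEraseIdx :
    ∀ (l : List Nat), l.Nodup → ∀ j, (hj : j < l.length) →
    l.filter (fun x => !(x == l.getD j 0)) = l.eraseIdx j := by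
  intro l
  induction l with
  | nil => intro _ j hj; simp at hj
  | cons a t ih =>
    intro hnd j hj
    rcases List.nodup_cons.mp hnd with ⟨ha, hndt⟩
    cases j with
    | zero =>
      simp only [List.getD_eq_getElem _ _ hj, List.getElem_cons_zero,
        List.eraseIdx_cons_zero, List.filter_cons]
      rw [if_neg (by simp)]
      refine List.filter_eq_self.mpr ?_
      intro x hx
      have hxa : x ≠ a := fun he => ha (he ▸ hx)
      simp [hxa]
    | succ j =>
      have hjt : j < t.length := by simpa using hj
      simp only [List.getD_eq_getElem _ _ hj, List.getElem_cons_succ, List.eraseIdx_cons_succ]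
      have haj : (a == t[j]) = false := by
        simp only [beq_eq_false_iff_ne, ne_eq]
        intro he; exact ha (he ▸ t.getElem_mem hjt)
      rw [List.filter_cons, if_pos (by simp [haj])]
      congr 1
      have := ih hndt j hjt
      rw [List.getD_eq_getElem _ _ hjt] at this
      exact this

theorem pvUnused_set (used : List Bool) (i : Nat) (hi : i < used.length) :
    pvUnused (used.set i true) =
      (pvUnused used).filter (fun x => !(x == i)) := by
  unfold pvUnused
  rw [List.filter_filter]
  rw [List.length_set]
  refine List.filter_congr ?_
  intro x hx
  have hxlt : x < used.length := List.mem_range.mp hx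
  by_cases he : i = x
  · subst he
    simp [List.getD, List.getElem?_set, hi]
  · simp [List.getD, List.getElem?_set, he, Ne.symm he]

theorem pvMain (nums : List Int) (k : Int) :
    ∀ (cnt : Nat) (used : List Bool) (path : List Int),
    used.count false = cnt → used.length = nums.length →
    permA_dfs nums k nums.length used path (path.length : Int) =
      permB_go k ((pvUnused used).map (fun i => nums.getD i 0)) path := by
  intro cnt
  induction cnt using Nat.strong_induction_on with
  | _ cnt ih =>
    intro used path hcnt hlen
    rw [permA_dfs, permB_go]
    by_cases hk : (path.length : Int) = k
    · simp [hk]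
    · simp only [hk, if_false]
      rw [pvLoopA_eq]
      rw [pvLoopB_eq k _ path ((pvUnused used).map (fun i => nums.getD i 0)).length 0 (by omega)]
      rw [(List.range_eq_range' (n := ((pvUnused used).map (fun i => nums.getD i 0)).length)).symm,
        List.length_map]
      have hfilter : (List.range nums.length).filter (fun i => !used.getD i true) = pvUnused used := by
        unfold pvUnused; rw [hlen]
      rw [hfilter]
      refine (pvFlatMapPos 0 (pvUnused used) _ _ ?_).symm
      intro j hj
      set i := (pvUnused used).getD j 0 with hi
      have himem : i ∈ pvUnused used := by
        rw [hi, List.getD_eq_getElem _ _ hj]; exact List.getElem_mem hj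
      have himem' : i ∈ (List.range used.length).filter (fun i => !used.getD i true) := himem
      have hfm := List.mem_filter.mp himem'
      have hiprop : (!used.getD i true) = true := hfm.2
      have hiused : used.getD i true = false := by simpa using hiprop
      have hilt : i < used.length := List.mem_range.mp hfm.1
      have hval : ((pvUnused used).map (fun i => nums.getD i 0)).getD j 0 = nums.getD i 0 := by
        rw [List.getD_eq_getElem _ _ (by simpa using hj), List.getElem_map,
          hi, List.getD_eq_getElem _ _ hj]
      have herase : ((pvUnused used).map (fun i => nums.getD i 0)).take j ++
            ((pvUnused used).map (fun i => nums.getD i 0)).drop (j + 1) =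
          (pvUnused (used.set i true)).map (fun i => nums.getD i 0) := by
        rw [← List.eraseIdx_eq_take_drop_succ, List.eraseIdx_map]
        rw [pvUnused_set used i hilt]
        congr 1
        exact (pvFilterNeEraseIdx (pvUnused used) (pvUnused_nodup used) j hj).symm
      rw [hval, herase]
      have hIH := ih ((used.set i true).count false)
        (hcnt ▸ pvCountFalseSetLt used i hiused)
        (used.set i true) (path ++ [nums.getD i 0]) rfl (by simp [hlen])
      have hdep : ((path ++ [nums.getD i 0]).length : Int) = (path.length : Int) + 1 := by
        simp
      rw [hdep] at hIH
      exact hIH.symm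

theorem pvUnused_replicate (n : Nat) :
    pvUnused (List.replicate n false) = List.range n := by
  unfold pvUnused
  rw [List.length_replicate]
  refine List.filter_eq_self.mpr ?_
  intro x hx
  have hxn := List.mem_range.mp hx
  simp [List.getD, List.getElem?_replicate, hxn]

theorem pvMapGetDRange (nums : List Int) :
    (List.range nums.length).map (fun i => nums.getD i 0) = nums := by
  refine List.ext_getElem (by simp) ?_
  intro i h1 h2
  rw [List.getElem_map, List.getElem_range]
  exact List.getD_eq_getElem _ _ h2

-- ===== VERDICT (by name: the statement is the Claim_ definition above) =====
theorem permute3_spec : Claim_equal_permute3 := by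
  intro nums k _
  unfold Spec_permute3 permute3 permute3_alt
  by_cases h : nums.length = 0
  · simp [h]
  · simp only [h, if_false]
    have := pvMain nums k ((List.replicate nums.length false).count false)
      (List.replicate nums.length false) [] rfl (by simp)
    simp only [List.length_nil, Nat.cast_zero, pvUnused_replicate, pvMapGetDRange] at this
    exact this
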